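-- pv_equiv track=rewrite | github.com/ELO-Lab/TF-MaOENAS | IGD.py | archive_check
-- ===== SOURCE A (Python) =====
-- def archive_check(ind_obj, archive_obj, archive_var, ind_var) -> list:
--     def is_dominated(ind_obj, ind_archive) -> bool:
--         condition_forall = True
--         condition_exists = False
--
--         for measure in range(len(ind_obj)):
--             if ind_obj[measure] > ind_archive[measure]:
--                 condition_forall = False
--                 break
--         for measure in range(len(ind_obj)):
--             if ind_obj[measure] < ind_archive[measure]:
--                 condition_exists = True
--                 break
--         return condition_forall and condition_exists
--
--     idx_indobj_dominated_by_archive = []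
--
--     for idx_archive in range(len(archive_obj)):
--         if is_dominated(ind_obj, archive_obj[idx_archive]):
--             idx_indobj_dominated_by_archive.append(idx_archive)
--
--         if is_dominated(archive_obj[idx_archive], ind_obj):
--             return archive_obj, archive_var
--
--     archive_obj_result = [ind_obj]
--     archive_var_result = [ind_var]
--     for idx in range(len(archive_obj)):
--         if idx not in idx_indobj_dominated_by_archive:
--             archive_obj_result.append(archive_obj[idx])
--             archive_var_result.append(archive_var[idx])
--
--     return archive_obj_result, archive_var_result
-- ===== SOURCE B (Python) =====
-- def archive_check(ind_obj, archive_obj, archive_var, ind_var) -> list: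
--     def classify(mem):
--         # one elementwise three-way scan: (some ind < mem, some ind > mem)
--         below = above = False
--         for i in range(len(ind_obj)):
--             if ind_obj[i] < mem[i]:
--                 below = True
--             elif ind_obj[i] > mem[i]:
--                 above = True
--         return below, above
--
--     dominated = False
--     keep_obj, keep_var = [ind_obj], [ind_var]
--     for mem, var in zip(archive_obj, archive_var):
--         below, above = classify(mem)
--         if above and not below:      # mem dominates ind_obj
--             dominated = True
--         if above or not below:       # ind_obj does not dominate mem
--             keep_obj.append(mem)
--             keep_var.append(var)
--     return (archive_obj, archive_var) if dominated else (keep_obj, keep_var)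
-- ===== Notes on version B (the rewrite author's own statement) =====
-- stated objective: alternative
-- what changed: B replaces A's two short-circuiting dominance tests per member plus a dominated-index list and an 'idx not in' membership rebuild by ONE three-way elementwise scan per member (flags below/above classify the member as dominating, dominated or incomparable) folded in a single pass that accumulates a dominated flag and the kept pair lists, deciding which pair to return at the end instead of early-returning.
-- outside the precondition, e.g. on archive_check([-1, 1], [[-2, 1]], [], [0]): A returns ([[-2, 1]], []), B returns ([[-1, 1]], [[0]])
import Mathlib
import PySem

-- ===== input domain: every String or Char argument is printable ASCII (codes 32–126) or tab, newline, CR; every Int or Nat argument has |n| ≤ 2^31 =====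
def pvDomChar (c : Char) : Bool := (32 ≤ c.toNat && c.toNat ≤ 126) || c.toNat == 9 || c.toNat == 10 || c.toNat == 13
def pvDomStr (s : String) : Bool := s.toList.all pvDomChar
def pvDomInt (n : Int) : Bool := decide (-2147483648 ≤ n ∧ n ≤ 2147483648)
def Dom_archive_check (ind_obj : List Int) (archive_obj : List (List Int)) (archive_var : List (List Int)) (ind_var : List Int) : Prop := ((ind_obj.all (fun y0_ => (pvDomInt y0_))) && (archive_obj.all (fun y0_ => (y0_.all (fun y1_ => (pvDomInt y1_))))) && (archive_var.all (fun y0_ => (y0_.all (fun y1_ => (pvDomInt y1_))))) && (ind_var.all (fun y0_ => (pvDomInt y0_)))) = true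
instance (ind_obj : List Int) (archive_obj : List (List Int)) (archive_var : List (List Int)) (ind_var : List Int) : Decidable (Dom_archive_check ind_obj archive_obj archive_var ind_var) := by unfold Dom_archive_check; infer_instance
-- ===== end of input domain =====

-- B replaces A's pair of short-circuiting dominance tests, dominated-index list and
-- 'idx not in' membership rebuild by one three-way elementwise scan per member folded in a
-- single pass with a dominated flag, deciding the returned pair at the end; objective: alternative.

-- ===== PORT A =====
-- first loop of A's is_dominated: condition_forall, breaking at the first x[m] > y[m]
def pvCondForall (x y : List Int) (m : Nat) : Bool :=
  if _h : m < x.length then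
    if x.getD m 0 > y.getD m 0 then false else pvCondForall x y (m + 1)
  else true
termination_by x.length - m

-- second loop of A's is_dominated: condition_exists, breaking at the first x[m] < y[m]
def pvCondExists (x y : List Int) (m : Nat) : Bool :=
  if _h : m < x.length then
    if x.getD m 0 < y.getD m 0 then true else pvCondExists x y (m + 1)
  else false
termination_by x.length - m

def pvIsDominated (x y : List Int) : Bool := pvCondForall x y 0 && pvCondExists x y 0

-- A's first loop: builds idx_indobj_dominated_by_archive, early-returning (none) when a
-- member dominates ind_obj (indexing is in range on every Pre_ input)
def pvScanA (ind_obj : List Int) (archive_obj : List (List Int)) (i : Nat) (acc : List Nat) : Option (List Nat) :=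
  if _h : i < archive_obj.length then
    let member := archive_obj.getD i []
    let acc' := if pvIsDominated ind_obj member then acc ++ [i] else acc
    if pvIsDominated member ind_obj then none
    else pvScanA ind_obj archive_obj (i + 1) acc'
  else some acc
termination_by archive_obj.length - i

def archive_check (ind_obj : List Int) (archive_obj : List (List Int)) (archive_var : List (List Int)) (ind_var : List Int) : List (List Int) × List (List Int) :=
  match pvScanA ind_obj archive_obj 0 [] with
  | none => (archive_obj, archive_var)
  | some dominated =>
      (List.range archive_obj.length).foldl
        (fun acc idx =>
          if dominated.contains idx then acc
          else (acc.1 ++ [archive_obj.getD idx []], acc.2 ++ [archive_var.getD idx []]))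
        ([ind_obj], [ind_var])

-- ===== PORT B =====
-- B's classify(mem): one elementwise scan producing (below, above) = (some ind<mem, some ind>mem)
def pvClassify (ind mem : List Int) : Bool × Bool :=
  (List.range ind.length).foldl
    (fun (p : Bool × Bool) i =>
      if ind.getD i 0 < mem.getD i 0 then (true, p.2)
      else if ind.getD i 0 > mem.getD i 0 then (p.1, true)
      else p)
    (false, false)

def archive_check_alt (ind_obj : List Int) (archive_obj : List (List Int)) (archive_var : List (List Int)) (ind_var : List Int) : List (List Int) × List (List Int) :=
  let st := (archive_obj.zip archive_var).foldl
    (fun (st : Bool × List (List Int) × List (List Int)) p =>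
      let c := pvClassify ind_obj p.1
      let dominated := st.1 || (c.2 && !c.1)
      if c.2 || !c.1 then (dominated, st.2.1 ++ [p.1], st.2.2 ++ [p.2])
      else (dominated, st.2.1, st.2.2))
    (false, [ind_obj], [ind_var])
  if st.1 then (archive_obj, archive_var) else (st.2.1, st.2.2)

-- ===== PRECONDITION & SPEC =====
-- Pre_ restricts to the natural domain of parallel, equal-length objective vectors with enough
-- variable rows; outside it A usually raises IndexError (ragged rows / short archive_var),
-- though on a few value-dependent corners it still early-returns (see claim cites).
def Pre_archive_check (ind_obj : List Int) (archive_obj : List (List Int)) (archive_var : List (List Int)) (ind_var : List Int) : Prop :=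
  (∀ row ∈ archive_obj, row.length = ind_obj.length) ∧ archive_obj.length ≤ archive_var.length
instance (ind_obj : List Int) (archive_obj : List (List Int)) (archive_var : List (List Int)) (ind_var : List Int) : Decidable (Pre_archive_check ind_obj archive_obj archive_var ind_var) := by unfold Pre_archive_check; infer_instance

def pvWitness_archive_check : List Int × List (List Int) × List (List Int) × List Int :=
  ([1, 2], [[0, 3], [2, 2]], [[7], [8]], [9])

def Spec_archive_check (ind_obj : List Int) (archive_obj : List (List Int)) (archive_var : List (List Int)) (ind_var : List Int) (out : List (List Int) × List (List Int)) : Prop := out = archive_check_alt ind_obj archive_obj archive_var ind_var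
instance (ind_obj : List Int) (archive_obj : List (List Int)) (archive_var : List (List Int)) (ind_var : List Int) (out : List (List Int) × List (List Int)) : Decidable (Spec_archive_check ind_obj archive_obj archive_var ind_var out) := by unfold Spec_archive_check; infer_instance

-- ===== CLAIM (what is proved, stated in full; the proofs are below) =====
def Claim_equal_archive_check : Prop := ∀ (ind_obj : List Int) (archive_obj : List (List Int)) (archive_var : List (List Int)) (ind_var : List Int), Dom_archive_check ind_obj archive_obj archive_var ind_var → Pre_archive_check ind_obj archive_obj archive_var ind_var → Spec_archive_check ind_obj archive_obj archive_var ind_var (archive_check ind_obj archive_obj archive_var ind_var)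

-- ===== LEMMAS AND PROOFS =====

theorem pvCondForall_iff (x y : List Int) (m : Nat) :
    pvCondForall x y m = true ↔ ∀ i, m ≤ i → i < x.length → x.getD i 0 ≤ y.getD i 0 := by
  fun_induction pvCondForall x y m with
  | case1 m h hgt =>
      simp only [Bool.false_eq_true, false_iff]
      intro hp
      exact absurd (hp m (le_refl m) h) (by omega)
  | case2 m h hgt ih =>
      rw [ih]
      constructor
      · intro hp i hmi hil
        rcases Nat.eq_or_lt_of_le hmi with rfl | hlt
        · omega
        · exact hp i hlt hil
      · intro hp i hmi hil
        exact hp i (by omega) hil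
  | case3 m h =>
      simp only [true_iff]
      intro i hmi hil; omega

theorem pvCondExists_iff (x y : List Int) (m : Nat) :
    pvCondExists x y m = true ↔ ∃ i, m ≤ i ∧ i < x.length ∧ x.getD i 0 < y.getD i 0 := by
  fun_induction pvCondExists x y m with
  | case1 m h hlt =>
      simp only [true_iff]
      exact ⟨m, le_refl m, h, hlt⟩
  | case2 m h hlt ih =>
      rw [ih]
      constructor
      · rintro ⟨i, h1, h2, h3⟩; exact ⟨i, by omega, h2, h3⟩
      · rintro ⟨i, h1, h2, h3⟩
        refine ⟨i, ?_, h2, h3⟩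
        rcases Nat.eq_or_lt_of_le h1 with rfl | hm
        · omega
        · omega
  | case3 m h =>
      simp only [Bool.false_eq_true, false_iff]
      rintro ⟨i, h1, h2, h3⟩; omega

-- generic shape of B's inner fold: each step or-accumulates two flags
theorem foldl_or_pair {α : Type} (g h : α → Bool) (hgh : ∀ a, g a = true → h a = false)
    (l : List α) (p : Bool × Bool) :
    l.foldl (fun (p : Bool × Bool) i =>
        if g i then (true, p.2) else if h i then (p.1, true) else p) p
      = (p.1 || l.any g, p.2 || l.any h) := by
  induction l generalizing p with
  | nil => simp
  | cons a l ih =>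
      simp only [List.foldl_cons, List.any_cons]
      by_cases hg : g a
      · simp [hg, hgh a hg, ih]
      · by_cases hh : h a
        · simp [hg, hh, ih]
        · simp [hg, hh, ih]

theorem pvClassify_eq (ind mem : List Int) :
    pvClassify ind mem =
      ((List.range ind.length).any (fun i => decide (ind.getD i 0 < mem.getD i 0)),
       (List.range ind.length).any (fun i => decide (ind.getD i 0 > mem.getD i 0))) := by
  unfold pvClassify
  rw [show (fun (p : Bool × Bool) i =>
      if ind.getD i 0 < mem.getD i 0 then (true, p.2)
      else if ind.getD i 0 > mem.getD i 0 then (p.1, true) else p)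
    = (fun (p : Bool × Bool) i =>
      if (fun i => decide (ind.getD i 0 < mem.getD i 0)) i = true then (true, p.2)
      else if (fun i => decide (ind.getD i 0 > mem.getD i 0)) i = true then (p.1, true) else p) by
    funext p i; simp]
  rw [foldl_or_pair _ _ (fun a ha => by simp at ha ⊢; omega)]
  simp

-- under equal lengths, A's 'member dominates ind' test in terms of B's classify flags
theorem isDominated_mem_ind (ind mem : List Int) (hlen : mem.length = ind.length) :
    pvIsDominated mem ind = ((pvClassify ind mem).2 && !(pvClassify ind mem).1) := by
  rw [pvClassify_eq, Bool.eq_iff_iff]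
  simp only [pvIsDominated, Bool.and_eq_true, pvCondForall_iff, pvCondExists_iff,
    List.any_eq_true, List.mem_range, decide_eq_true_eq, Bool.not_eq_eq_eq_not, Bool.not_true,
    List.any_eq_false, not_lt, hlen]
  constructor
  · rintro ⟨h1, i, _, h2, h3⟩
    exact ⟨⟨i, h2, by omega⟩, fun j hj => by have := h1 j (Nat.zero_le j) hj; omega⟩
  · rintro ⟨⟨i, h2, h3⟩, h1⟩
    exact ⟨fun j _ hj => by have := h1 j hj; omega, i, Nat.zero_le i, h2, by omega⟩

-- and A's 'ind dominates member' test
theorem isDominated_ind_mem (ind mem : List Int) :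
    pvIsDominated ind mem = ((pvClassify ind mem).1 && !(pvClassify ind mem).2) := by
  rw [pvClassify_eq, Bool.eq_iff_iff]
  simp only [pvIsDominated, Bool.and_eq_true, pvCondForall_iff, pvCondExists_iff,
    List.any_eq_true, List.mem_range, decide_eq_true_eq, Bool.not_eq_eq_eq_not, Bool.not_true,
    List.any_eq_false, not_lt]
  constructor
  · rintro ⟨h1, i, _, h2, h3⟩
    exact ⟨⟨i, h2, h3⟩, fun j hj => by have := h1 j (Nat.zero_le j) hj; omega⟩
  · rintro ⟨⟨i, h2, h3⟩, h1⟩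
    exact ⟨fun j _ hj => by have := h1 j hj; omega, i, Nat.zero_le i, h2, h3⟩

theorem pvScanA_spec (ind_obj : List Int) (archive_obj : List (List Int)) (i : Nat) (acc : List Nat) :
    pvScanA ind_obj archive_obj i acc =
      if (List.range' i (archive_obj.length - i)).any
           (fun j => pvIsDominated (archive_obj.getD j []) ind_obj) then none
      else some (acc ++ (List.range' i (archive_obj.length - i)).filter
           (fun j => pvIsDominated ind_obj (archive_obj.getD j []))) := by
  fun_induction pvScanA ind_obj archive_obj i acc with
  | case1 i acc h member hdom =>
      have hr : archive_obj.length - i = (archive_obj.length - (i+1)) + 1 := by omega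
      rw [hr, List.range'_succ]
      simp [member] at hdom
      simp [hdom]
  | case2 i acc h member acc' hdom ih =>
      have hr : archive_obj.length - i = (archive_obj.length - (i+1)) + 1 := by omega
      rw [ih, hr, List.range'_succ]
      simp only [List.any_cons, List.filter_cons]
      simp only [member] at hdom
      simp only [hdom, Bool.false_or]
      split
      · rfl
      · simp only [acc', member]
        split <;> simp
  | case3 i acc h =>
      have hr : archive_obj.length - i = 0 := by omega
      simp [hr]

-- B's outer fold, characterised: flag = any dominating member, lists = kept prefix
theorem foldB_spec (ind : List Int) (l : List (List Int × List Int)) (d : Bool) (o v : List (List Int)) :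
    l.foldl (fun (st : Bool × List (List Int) × List (List Int)) p =>
        let c := pvClassify ind p.1
        let dominated := st.1 || (c.2 && !c.1)
        if c.2 || !c.1 then (dominated, st.2.1 ++ [p.1], st.2.2 ++ [p.2])
        else (dominated, st.2.1, st.2.2)) (d, o, v)
      = (d || l.any (fun p => (pvClassify ind p.1).2 && !(pvClassify ind p.1).1),
         o ++ (l.filter (fun p => (pvClassify ind p.1).2 || !(pvClassify ind p.1).1)).map Prod.fst,
         v ++ (l.filter (fun p => (pvClassify ind p.1).2 || !(pvClassify ind p.1).1)).map Prod.snd) := by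
  induction l generalizing d o v with
  | nil => simp
  | cons a l ih =>
      simp only [List.foldl_cons, List.any_cons, List.filter_cons]
      by_cases hk : ((pvClassify ind a.1).2 || !(pvClassify ind a.1).1) = true
      · simp only [hk, if_pos, ih, List.map_cons, List.append_assoc, List.cons_append,
          List.nil_append, Bool.or_assoc]
      · have hd : ((pvClassify ind a.1).2 && !(pvClassify ind a.1).1) = false := by
          revert hk; cases (pvClassify ind a.1).2 <;> cases (pvClassify ind a.1).1 <;> simp
        simp only [hk, Bool.false_eq_true, if_false, ih, hd, Bool.or_false]
        simp

theorem map_index_zip (ao av : List (List Int)) (h : ao.length ≤ av.length) :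
    (List.range ao.length).map (fun i => (ao.getD i [], av.getD i [])) = ao.zip av := by
  apply List.ext_getElem
  · simp [Nat.min_eq_left h]
  · intro i h1 h2
    have hao : i < ao.length := by simpa using h1
    have hav : i < av.length := by omega
    simp [List.getElem_zip, List.getD, List.getElem?_eq_getElem hao, List.getElem?_eq_getElem hav]

theorem foldl_ext' {α β : Type} (f g : β → α → β) (l : List α)
    (H : ∀ a ∈ l, ∀ b, f b a = g b a) (init : β) : l.foldl f init = l.foldl g init := by
  induction l generalizing init with
  | nil => rfl
  | cons a l ih =>
      simp only [List.foldl_cons]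
      rw [H a List.mem_cons_self, ih (fun a ha b => H a (List.mem_cons_of_mem _ ha) b)]

-- generic shape of A's rebuilding fold: append-unless-contained = filter + map
theorem foldA_filter (c : Nat → Bool) (f g : Nat → List Int) (l : List Nat) (o v : List (List Int)) :
    l.foldl (fun (acc : List (List Int) × List (List Int)) idx =>
        if c idx then acc else (acc.1 ++ [f idx], acc.2 ++ [g idx])) (o, v)
      = (o ++ (l.filter (fun i => !c i)).map f, v ++ (l.filter (fun i => !c i)).map g) := by
  induction l generalizing o v with
  | nil => simp
  | cons a l ih =>
      simp only [List.foldl_cons, List.filter_cons]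
      by_cases hc : c a
      · simp [hc, ih]
      · simp [hc, ih]

theorem archive_check_eq_alt (ind_obj : List Int) (archive_obj : List (List Int)) (archive_var : List (List Int)) (ind_var : List Int)
    (hpre : (∀ row ∈ archive_obj, row.length = ind_obj.length) ∧ archive_obj.length ≤ archive_var.length)  :
    archive_check ind_obj archive_obj archive_var ind_var = archive_check_alt ind_obj archive_obj archive_var ind_var := by
  unfold archive_check archive_check_alt
  rw [pvScanA_spec]
  simp only [foldB_spec, Bool.false_or, Nat.sub_zero, List.nil_append]
  have hz : archive_obj.zip archive_var
      = (List.range archive_obj.length).map (fun i => (archive_obj.getD i [], archive_var.getD i [])) :=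
    (map_index_zip _ _ hpre.2).symm
  rw [hz, List.any_map, List.filter_map, List.map_map, List.map_map]
  have hdomEq : ∀ j ∈ List.range archive_obj.length,
      (pvIsDominated (archive_obj.getD j []) ind_obj)
        = ((pvClassify ind_obj (archive_obj.getD j [])).2 && !(pvClassify ind_obj (archive_obj.getD j [])).1) := by
    intro j hj
    have hj' := List.mem_range.mp hj
    exact isDominated_mem_ind ind_obj (archive_obj.getD j [])
      (hpre.1 _ (by rw [List.getD_eq_getElem _ _ hj']; exact List.getElem_mem hj'))
  have hany : ((List.range' 0 archive_obj.length).any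
        (fun j => pvIsDominated (archive_obj.getD j []) ind_obj))
      = ((List.range archive_obj.length).any
        ((fun p : List Int × List Int => (pvClassify ind_obj p.1).2 && !(pvClassify ind_obj p.1).1)
          ∘ (fun i => (archive_obj.getD i [], archive_var.getD i [])))) := by
    rw [← List.range_eq_range', Bool.eq_iff_iff]
    simp only [List.any_eq_true, Function.comp_apply]
    constructor
    · rintro ⟨j, hj, h⟩; exact ⟨j, hj, by rw [← hdomEq j hj]; exact h⟩
    · rintro ⟨j, hj, h⟩; exact ⟨j, hj, by rw [hdomEq j hj]; exact h⟩
  rw [hany]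
  by_cases hc : ((List.range archive_obj.length).any
      ((fun p : List Int × List Int => (pvClassify ind_obj p.1).2 && !(pvClassify ind_obj p.1).1)
        ∘ (fun i => (archive_obj.getD i [], archive_var.getD i [])))) = true
  · rw [if_pos hc, if_pos hc]
  · rw [if_neg hc, if_neg hc]
    -- iota-reduce the match on the (now explicit) some
    rw [show ∀ (L : List Nat), (match some L with
        | none => (archive_obj, archive_var)
        | some dominated =>
            (List.range archive_obj.length).foldl
              (fun acc idx =>
                if dominated.contains idx then acc
                else (acc.1 ++ [archive_obj.getD idx []], acc.2 ++ [archive_var.getD idx []]))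
              ([ind_obj], [ind_var]))
        = (List.range archive_obj.length).foldl
            (fun acc idx =>
              if L.contains idx then acc
              else (acc.1 ++ [archive_obj.getD idx []], acc.2 ++ [archive_var.getD idx []]))
            ([ind_obj], [ind_var]) from fun L => rfl]
    -- rewrite A's rebuilding loop: 'contains' over the collected index list = the dominance test
    rw [foldl_ext' _
      (fun (acc : List (List Int) × List (List Int)) idx =>
        if pvIsDominated ind_obj (archive_obj.getD idx []) then acc
        else (acc.1 ++ [archive_obj.getD idx []], acc.2 ++ [archive_var.getD idx []]))
      (List.range archive_obj.length)
      (fun idx hidx b => by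
        have hmem : (((List.range' 0 archive_obj.length).filter
            (fun j => pvIsDominated ind_obj (archive_obj.getD j []))).contains idx)
            = pvIsDominated ind_obj (archive_obj.getD idx []) := by
          rw [Bool.eq_iff_iff, List.contains_iff_exists_mem_beq]
          simp only [List.mem_filter, beq_iff_eq]
          constructor
          · rintro ⟨j, ⟨hj1, hj2⟩, rfl⟩; exact hj2
          · intro hd; exact ⟨idx, ⟨by simpa [List.range_eq_range'] using hidx, hd⟩, rfl⟩
        simp only [hmem])]
    rw [show (fun (acc : List (List Int) × List (List Int)) idx =>
        if pvIsDominated ind_obj (archive_obj.getD idx []) then acc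
        else (acc.1 ++ [archive_obj.getD idx []], acc.2 ++ [archive_var.getD idx []]))
      = (fun (acc : List (List Int) × List (List Int)) idx =>
        if (fun i => pvIsDominated ind_obj (archive_obj.getD i [])) idx = true then acc
        else (acc.1 ++ [(fun i => archive_obj.getD i []) idx], acc.2 ++ [(fun i => archive_var.getD i []) idx])) from rfl,
      foldA_filter]
    -- both sides are now filter+map over List.range; equate predicates and projections
    have hfil : (List.range archive_obj.length).filter
          (fun i => !pvIsDominated ind_obj (archive_obj.getD i []))
        = (List.range archive_obj.length).filter
          ((fun p : List Int × List Int => (pvClassify ind_obj p.1).2 || !(pvClassify ind_obj p.1).1)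
            ∘ (fun i => (archive_obj.getD i [], archive_var.getD i []))) := by
      apply List.filter_congr
      intro j hj
      simp only [Function.comp_apply, isDominated_ind_mem]
      cases (pvClassify ind_obj (archive_obj.getD j [])).1 <;>
        cases (pvClassify ind_obj (archive_obj.getD j [])).2 <;> simp
    rw [hfil]
    rfl

-- ===== VERDICT (by name: the statement is the Claim_ definition above) =====
theorem archive_check_spec : Claim_equal_archive_check := by
  intro ind_obj archive_obj archive_var ind_var _hdom hpre
  unfold Spec_archive_check
  exact archive_check_eq_alt ind_obj archive_obj archive_var ind_var hpre
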